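-- pv_equiv track=rewrite | github.com/shaun-russell/expat-nlp | expat/core/structures.py | get_exit_points
-- ===== SOURCE A (Python) =====
-- def get_exit_points(decomposed_pattern):
--   ''' Obsolete? '''
--   # establish the exit nodes for the pattern
--   # same as entry, but with a reversed list
--   # could actually refactor this
--   exit_nodes = []
--   # [::-1] reverses a list
--   for is_required,item in decomposed_pattern[::-1]:
--     if is_required:
--       exit_nodes.append(item)
--       # add the required entry point
--       break
--     else:
--       exit_nodes.append(item)
--   return exit_nodes
-- ===== SOURCE B (Python) =====
-- def get_exit_points(decomposed_pattern):
--   # forward scan: index of the last required node (0 if none), then slice + reverse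
--   cut = 0
--   for i, (is_required, _item) in enumerate(decomposed_pattern):
--     if is_required:
--       cut = i
--   return [item for _, item in decomposed_pattern[cut:][::-1]]
-- ===== Notes on version B (the rewrite author's own statement) =====
-- stated objective: alternative
-- what changed: Replaces the backward accumulate-until-required loop with a forward full scan that records the index of the last required node, then returns the reversed items of the slice from that index.
import Mathlib
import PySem

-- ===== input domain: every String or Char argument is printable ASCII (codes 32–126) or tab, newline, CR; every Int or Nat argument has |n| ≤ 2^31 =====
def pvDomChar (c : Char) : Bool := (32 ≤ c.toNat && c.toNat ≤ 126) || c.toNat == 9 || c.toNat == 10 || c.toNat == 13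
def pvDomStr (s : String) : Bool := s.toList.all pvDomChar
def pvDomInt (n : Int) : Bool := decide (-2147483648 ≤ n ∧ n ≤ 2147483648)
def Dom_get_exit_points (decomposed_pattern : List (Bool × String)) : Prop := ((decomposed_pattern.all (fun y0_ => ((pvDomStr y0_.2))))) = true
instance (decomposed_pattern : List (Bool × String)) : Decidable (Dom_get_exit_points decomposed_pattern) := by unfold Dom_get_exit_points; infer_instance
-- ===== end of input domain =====

-- B replaces A's backward accumulate-until-required loop by a forward last-required-index scan
-- plus slice-and-reverse; same cost, different traversal (objective: alternative).

-- ===== PORT A =====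
-- the for-loop over decomposed_pattern[::-1] with break, as structural recursion
def get_exit_points_loopA : List (Bool × String) → List String
  | [] => []
  | (is_required, item) :: rest =>
      if is_required then [item] else item :: get_exit_points_loopA rest

def get_exit_points (decomposed_pattern : List (Bool × String)) : List String :=
  get_exit_points_loopA decomposed_pattern.reverse

-- ===== PORT B =====
def get_exit_points_alt (decomposed_pattern : List (Bool × String)) : List String :=
  let cut : Int := (PySem.List.enumerate decomposed_pattern).foldl
      (fun acc p => if p.2.1 then p.1 else acc) 0
  ((PySem.List.slice decomposed_pattern (some cut) none).reverse).map (·.2)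

-- ===== PRECONDITION & SPEC =====
def Spec_get_exit_points (decomposed_pattern : List (Bool × String)) (out : List String) : Prop := out = get_exit_points_alt decomposed_pattern
instance (decomposed_pattern : List (Bool × String)) (out : List String) : Decidable (Spec_get_exit_points decomposed_pattern out) := by unfold Spec_get_exit_points; infer_instance

-- ===== CLAIM (what is proved, stated in full; the proofs are below) =====
def Claim_equal_get_exit_points : Prop := ∀ (decomposed_pattern : List (Bool × String)), Dom_get_exit_points decomposed_pattern → Spec_get_exit_points decomposed_pattern (get_exit_points decomposed_pattern)

-- ===== LEMMAS AND PROOFS =====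

def cutB (l : List (Bool × String)) : Int :=
  (PySem.List.enumerate l).foldl (fun acc p => if p.2.1 then p.1 else acc) 0

theorem alt_eq (l : List (Bool × String)) :
    get_exit_points_alt l
      = ((PySem.List.slice l (some (cutB l)) none).reverse).map (·.2) := rfl

theorem cutB_snoc (xs : List (Bool × String)) (x : Bool × String) :
    cutB (xs ++ [x]) = if x.1 then (xs.length : Int) else cutB xs := by
  unfold cutB
  rw [PySem.List.enumerate_append]
  simp [PySem.List.enumerate]

theorem cutB_bounds (l : List (Bool × String)) :
    0 ≤ cutB l ∧ cutB l ≤ l.length := by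
  induction l using List.reverseRecOn with
  | nil => simp [cutB, PySem.List.enumerate]
  | append_singleton xs x ih =>
      rw [cutB_snoc]
      rcases ih with ⟨h0, h1⟩
      by_cases hx : x.1 <;> simp [hx] <;> omega

theorem main_eq (l : List (Bool × String)) :
    get_exit_points l = get_exit_points_alt l := by
  induction l using List.reverseRecOn with
  | nil => simp [get_exit_points, get_exit_points_loopA, alt_eq,
      PySem.List.slice, cutB, PySem.List.enumerate]
  | append_singleton xs x ih =>
      rcases cutB_bounds xs with ⟨h0, h1⟩
      rw [alt_eq, cutB_snoc]
      by_cases hx : x.1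
      · -- last element required: A returns [x.2], cut = xs.length
        simp only [hx, if_pos]
        rw [PySem.List.slice_from_natCast]
        simp [get_exit_points, get_exit_points_loopA, hx]
      · simp only [hx, if_neg, Bool.false_eq_true, not_false_iff]
        rw [PySem.List.slice_from _ h0]
        have hle : (cutB xs).toNat ≤ xs.length := by omega
        rw [List.drop_append_of_le_length hle]
        have : get_exit_points (xs ++ [x]) = x.2 :: get_exit_points xs := by
          simp [get_exit_points, get_exit_points_loopA, hx]
        rw [this, ih, alt_eq, PySem.List.slice_from _ h0]
        simp

-- ===== VERDICT (by name: the statement is the Claim_ definition above) =====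
theorem get_exit_points_spec : Claim_equal_get_exit_points := by
  intro l _
  unfold Spec_get_exit_points
  exact main_eq l
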